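-- pv_equiv track=rewrite | github.com/Usopked/til | 자료구조/백준/Class/class4/1043.py | count_valid_parties
-- ===== SOURCE A (Python) =====
-- def dfs(party, parties, truth_known, visited):
--     # If the party has already been visited, return
--     if visited[party]:
--         return
--     visited[party] = True
--
--     # Mark all attendees of the party as knowing the truth
--     for attendee in parties[party]:
--         truth_known.add(attendee)
--
--     # Recursively visit all parties that the attendees have attended
--     for i, other_party in enumerate(parties):
--         if not visited[i] and any(attendee in truth_known for attendee in other_party):
--             dfs(i, parties, truth_known, visited)
--
-- def count_valid_parties(N, M, known_truth, party_people):
--     truth_known = set(known_truth)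
--     visited = [False] * M
--
--     for i, party in enumerate(party_people):
--         # Start DFS for parties that have attendees who know the truth
--         if any(person in truth_known for person in party):
--             dfs(i, party_people, truth_known, visited)
--
--     # Count valid parties
--     valid_parties_count = sum(1 for i, party in enumerate(party_people) if not any(person in truth_known for person in party))
--
--     return valid_parties_count
-- ===== SOURCE B (Python) =====
-- def count_valid_parties(N, M, known_truth, party_people):
--     # Round-based saturation instead of recursive DFS: repeatedly sweep the
--     # parties, absorbing any party that touches the truth set, until stable.
--     truth = set(known_truth)
--     changed = True
--     while changed:
--         changed = False
--         for party in party_people: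
--             if any(p in truth for p in party) and not all(p in truth for p in party):
--                 truth.update(party)
--                 changed = True
--     return sum(1 for party in party_people if not any(p in truth for p in party))
-- ===== Notes on version B (the rewrite author's own statement) =====
-- stated objective: simpler
-- what changed: Replaces the recursive party-graph DFS with a visited array and incremental truth set by a plain round-based fixpoint: repeatedly sweep the party list, absorbing any party that touches the truth set, until a sweep changes nothing; no recursion and no visited bookkeeping.
import Mathlib
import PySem

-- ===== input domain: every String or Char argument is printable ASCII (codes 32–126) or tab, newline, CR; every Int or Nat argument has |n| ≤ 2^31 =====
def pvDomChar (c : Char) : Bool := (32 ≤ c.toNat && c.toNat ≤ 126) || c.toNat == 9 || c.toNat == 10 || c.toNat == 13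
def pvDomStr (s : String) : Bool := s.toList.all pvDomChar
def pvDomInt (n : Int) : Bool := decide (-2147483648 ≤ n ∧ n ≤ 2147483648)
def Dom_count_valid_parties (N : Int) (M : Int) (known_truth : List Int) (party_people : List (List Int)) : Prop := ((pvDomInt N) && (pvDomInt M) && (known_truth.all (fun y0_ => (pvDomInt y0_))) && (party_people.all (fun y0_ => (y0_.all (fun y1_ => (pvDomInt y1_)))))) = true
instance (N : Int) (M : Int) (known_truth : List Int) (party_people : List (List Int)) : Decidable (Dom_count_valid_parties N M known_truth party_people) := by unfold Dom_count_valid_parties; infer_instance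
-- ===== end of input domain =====

-- B replaces A's recursive DFS over the party graph by a round-based fixpoint sweep
-- (objective: simpler — no recursion, no visited array); return values proved equal on Pre_.

-- ===== PORT A =====
-- 'p in truth_known' for the Python set truth_known
def pvAny (T : PySem.Set Int) (party : List Int) : Bool := party.any (fun p => T.contains p)

-- literal port of A's dfs; state = (truth_known, visited); fuel bounds the recursion
-- depth (each real call marks one unvisited party, so parties.length + 1 is enough —
-- proved in the lemmas below); visited[party] / visited[i] ports as pyGetD/pySetD,
-- exact under Pre_ (indices in range there).
def pvDfs (parties : List (List Int)) : Nat → Int → PySem.Set Int × List Bool → PySem.Set Int × List Bool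
  | 0, _, st => st
  | fuel+1, party, st =>
    if PySem.List.pyGetD st.2 party false then st
    else
      (PySem.List.enumerate parties 0).foldl
        (fun st2 ip =>
          if !(PySem.List.pyGetD st2.2 ip.1 false) && pvAny st2.1 ip.2 then
            pvDfs parties fuel ip.1 st2
          else st2)
        ((PySem.List.pyGetD parties party []).foldl PySem.Set.add st.1,
         PySem.List.pySetD st.2 party true)

def count_valid_parties (N : Int) (M : Int) (known_truth : List Int) (party_people : List (List Int)) : Int :=
  let st := (PySem.List.enumerate party_people 0).foldl
    (fun st ip => if pvAny st.1 ip.2 then pvDfs party_people (party_people.length + 1) ip.1 st else st)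
    (PySem.Set.ofList known_truth, List.replicate M.toNat false)
  (PySem.List.enumerate party_people 0).foldl
    (fun acc ip => if !(pvAny st.1 ip.2) then acc + 1 else acc) (0 : Int)

-- ===== PORT B =====
def pvAll (T : PySem.Set Int) (party : List Int) : Bool := party.all (fun p => T.contains p)

-- body of B's inner 'for party in party_people' loop; state = (truth, changed)
def pvPassStep (st : PySem.Set Int × Bool) (party : List Int) : PySem.Set Int × Bool :=
  if pvAny st.1 party && !(pvAll st.1 party) then (PySem.Set.update st.1 party, true) else st

-- one sweep of B's while-loop body
def pvPass (parties : List (List Int)) (T : PySem.Set Int) : PySem.Set Int × Bool :=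
  parties.foldl pvPassStep (T, false)

-- B's 'while changed' loop; each changing sweep adds at least one element drawn from
-- parties' members, so flatten.length + 1 sweeps always reach the exit (proved below).
def pvSaturate (parties : List (List Int)) : Nat → PySem.Set Int → PySem.Set Int
  | 0, T => T
  | fuel+1, T =>
    if (pvPass parties T).2 then pvSaturate parties fuel (pvPass parties T).1
    else (pvPass parties T).1

def count_valid_parties_alt (N : Int) (M : Int) (known_truth : List Int) (party_people : List (List Int)) : Int :=
  let T := pvSaturate party_people (party_people.flatten.length + 1) (PySem.Set.ofList known_truth)
  party_people.foldl (fun acc party => if !(pvAny T party) then acc + 1 else acc) (0 : Int)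

-- ===== PRECONDITION & SPEC =====
-- A raises IndexError iff party_people has more than M parties AND some party contains
-- a member of known_truth (then dfs runs and indexes visited past its M slots); Pre_
-- is exactly the complement, i.e. all inputs on which A returns.
def Pre_count_valid_parties (N : Int) (M : Int) (known_truth : List Int) (party_people : List (List Int)) : Prop :=
  (party_people.length : Int) ≤ M ∨ ∀ party ∈ party_people, ∀ p ∈ party, p ∉ known_truth
instance (N : Int) (M : Int) (known_truth : List Int) (party_people : List (List Int)) : Decidable (Pre_count_valid_parties N M known_truth party_people) := by unfold Pre_count_valid_parties; infer_instance

def pvWitness_count_valid_parties : Int × Int × List Int × List (List Int) := (3, 3, [1], [[1, 2], [3], [2, 4]])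

def Spec_count_valid_parties (N : Int) (M : Int) (known_truth : List Int) (party_people : List (List Int)) (out : Int) : Prop := out = count_valid_parties_alt N M known_truth party_people
instance (N : Int) (M : Int) (known_truth : List Int) (party_people : List (List Int)) (out : Int) : Decidable (Spec_count_valid_parties N M known_truth party_people out) := by unfold Spec_count_valid_parties; infer_instance

-- ===== CLAIM (what is proved, stated in full; the proofs are below) =====
def Claim_equal_count_valid_parties : Prop := ∀ (N : Int) (M : Int) (known_truth : List Int) (party_people : List (List Int)), Dom_count_valid_parties N M known_truth party_people → Pre_count_valid_parties N M known_truth party_people → Spec_count_valid_parties N M known_truth party_people (count_valid_parties N M known_truth party_people)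

-- ===== LEMMAS AND PROOFS =====

-- S ⊆ T as membership
def pvSub (S T : List Int) : Prop := ∀ x : Int, x ∈ S → x ∈ T

-- T is saturated: any party touching T lies inside T
def pvClosed (parties : List (List Int)) (T : List Int) : Prop :=
  ∀ party ∈ parties, (∃ p ∈ party, p ∈ T) → ∀ p ∈ party, p ∈ T

-- number of unvisited party indices (A's fuel measure)
def pvUC (plen : Nat) (v : List Bool) : Nat :=
  (List.range plen).countP (fun i => !(v.getD i false))

-- invariant R: a visited party's members are all known
def pvInvR (parties : List (List Int)) (T : List Int) (v : List Bool) : Prop :=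
  ∀ k : Nat, k < parties.length → v.getD k false = true → ∀ p ∈ parties.getD k [], p ∈ T

-- invariant S: an unvisited party is disjoint from the truth set
def pvInvS (parties : List (List Int)) (T : List Int) (v : List Bool) : Prop :=
  ∀ k : Nat, k < parties.length → v.getD k false = false → ∀ p ∈ parties.getD k [], p ∉ T

lemma pvAny_iff (T : PySem.Set Int) (party : List Int) :
    pvAny T party = true ↔ ∃ p ∈ party, p ∈ T := by
  simp [pvAny]

lemma pvAll_iff (T : PySem.Set Int) (party : List Int) :
    pvAll T party = true ↔ ∀ p ∈ party, p ∈ T := by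
  simp [pvAll]

lemma pvAny_congr (S T : PySem.Set Int) (h : ∀ x : Int, x ∈ S ↔ x ∈ T) (party : List Int) :
    pvAny S party = pvAny T party := by
  rw [Bool.eq_iff_iff, pvAny_iff, pvAny_iff]
  constructor
  · rintro ⟨p, hp, hm⟩; exact ⟨p, hp, (h p).1 hm⟩
  · rintro ⟨p, hp, hm⟩; exact ⟨p, hp, (h p).2 hm⟩

lemma pv_countP_lt {α : Type} (l : List α) (p q : α → Bool)
    (hmono : ∀ a, q a = true → p a = true) (x : α) (hx : x ∈ l)
    (hpx : p x = true) (hqx : q x = false) : l.countP q < l.countP p := by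
  induction l with
  | nil => cases hx
  | cons a l ih =>
    have hmem := List.countP_mono_left (l := l) (p := q) (q := p) (fun a _ => hmono a)
    rcases List.mem_cons.1 hx with rfl | hx
    · simp [hpx, hqx]
      omega
    · have := ih hx
      simp only [List.countP_cons]
      have hq : (if q a = true then 1 else 0) ≤ (if p a = true then 1 else 0) := by
        by_cases h : q a = true
        · simp [h, hmono a h]
        · simp [h]
      omega

lemma pv_getD_set_true_mono (v : List Bool) (m k : Nat) (h : v.getD k false = true) :
    (v.set m true).getD k false = true := by
  have hk : k < v.length := by
    by_contra hk
    rw [List.getD_eq_getElem?_getD, List.getElem?_eq_none (by omega)] at h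
    simp at h
  by_cases hmk : k = m
  · subst hmk
    simp [List.getD_eq_getElem?_getD, hk]
  · rw [List.getD_eq_getElem?_getD, List.getElem?_set_ne (by omega)]
    rw [List.getD_eq_getElem?_getD] at h
    exact h

lemma pvUC_set_true (plen : Nat) (v : List Bool) (k : Nat) (hk : k < plen)
    (hkv : k < v.length)
    (hv : v.getD k false = false) : pvUC plen (v.set k true) < pvUC plen v := by
  unfold pvUC
  refine pv_countP_lt _ _ _ (fun i hi => ?_) k (List.mem_range.2 hk)
    (by simp only [hv, Bool.not_false]) ?_
  · simp only [Bool.not_eq_true'] at hi ⊢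
    by_contra hvi
    simp only [Bool.not_eq_false] at hvi
    rw [pv_getD_set_true_mono v k i hvi] at hi
    cases hi
  · simp [List.getD_eq_getElem?_getD, hkv]

lemma pvUC_le (plen : Nat) (v : List Bool) : pvUC plen v ≤ plen := by
  simpa using List.countP_le_length (l := List.range plen) (p := fun i => !(v.getD i false))

lemma pvUC_mono (plen : Nat) (v w : List Bool)
    (h : ∀ k : Nat, v.getD k false = true → w.getD k false = true) :
    pvUC plen w ≤ pvUC plen v := by
  unfold pvUC
  refine List.countP_mono_left (fun i _ hi => ?_)
  simp only [Bool.not_eq_true'] at hi ⊢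
  by_contra hvi
  simp only [Bool.not_eq_false] at hvi
  rw [h i hvi] at hi
  cases hi

-- ===== A-side =====

lemma pvDfs_visited (parties : List (List Int)) (fuel : Nat) (party : Int)
    (st : PySem.Set Int × List Bool) (h : PySem.List.pyGetD st.2 party false = true) :
    pvDfs parties fuel party st = st := by
  cases fuel <;> simp [pvDfs, h]

-- the main invariant lemma for A's dfs: a real call (k unvisited, enough fuel)
-- preserves R, establishes S for every index, grows the state monotonically
lemma pvDfs_main (parties : List (List Int)) : ∀ (fuel : Nat) (k : Nat)
    (st : PySem.Set Int × List Bool),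
    parties.length ≤ st.2.length → k < parties.length →
    st.2.getD k false = false → pvUC parties.length st.2 ≤ fuel →
    pvInvR parties st.1 st.2 →
    pvInvR parties (pvDfs parties fuel (k : Int) st).1 (pvDfs parties fuel (k : Int) st).2 ∧
    pvInvS parties (pvDfs parties fuel (k : Int) st).1 (pvDfs parties fuel (k : Int) st).2 ∧
    pvSub st.1 (pvDfs parties fuel (k : Int) st).1 ∧
    (∀ j : Nat, st.2.getD j false = true → (pvDfs parties fuel (k : Int) st).2.getD j false = true) ∧
    (pvDfs parties fuel (k : Int) st).2.length = st.2.length := by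
  intro fuel
  induction fuel with
  | zero =>
    intro k st hlen hk hv hfuel hR
    exfalso
    have h0 : pvUC parties.length st.2 = 0 := by omega
    have := List.countP_eq_zero.1 h0 k (List.mem_range.2 hk)
    exact this (by rw [hv]; rfl)
  | succ f ih =>
    intro k st hlen hk hv hfuel hR
    have hkv : k < st.2.length := lt_of_lt_of_le hk hlen
    -- unfold one step of pvDfs
    have hunf : pvDfs parties (f + 1) (k : Int) st =
        (PySem.List.enumerate parties 0).foldl
          (fun st2 ip =>
            if !(PySem.List.pyGetD st2.2 ip.1 false) && pvAny st2.1 ip.2 then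
              pvDfs parties f ip.1 st2
            else st2)
          ((parties.getD k []).foldl PySem.Set.add st.1, st.2.set k true) := by
      have h1 : pvDfs parties (f + 1) (k : Int) st =
          if PySem.List.pyGetD st.2 (k : Int) false then st
          else (PySem.List.enumerate parties 0).foldl
            (fun st2 ip =>
              if !(PySem.List.pyGetD st2.2 ip.1 false) && pvAny st2.1 ip.2 then
                pvDfs parties f ip.1 st2
              else st2)
            ((PySem.List.pyGetD parties (k : Int) []).foldl PySem.Set.add st.1,
             PySem.List.pySetD st.2 (k : Int) true) := rfl
      rw [h1, PySem.List.pyGetD_natCast, hv, PySem.List.pyGetD_natCast,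
        PySem.List.pySetD_natCast]
      simp
    rw [hunf]
    -- the state after marking k and absorbing party k
    set T1 : PySem.Set Int := (parties.getD k []).foldl PySem.Set.add st.1 with hT1
    set v1 : List Bool := st.2.set k true with hv1
    have hmemT1 : ∀ x : Int, x ∈ T1 ↔ x ∈ st.1 ∨ x ∈ parties.getD k [] := by
      intro x
      simpa [PySem.Set.update] using
        PySem.Set.mem_update (s := st.1) (xs := parties.getD k []) (y := x)
    have hv1k : v1.getD k false = true := by
      rw [hv1]; simp [List.getD_eq_getElem?_getD, hkv]
    have hv1ne : ∀ j : Nat, j ≠ k → v1.getD j false = st.2.getD j false := by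
      intro j hj
      rw [hv1]; simp [List.getD_eq_getElem?_getD, List.getElem?_set_ne (Ne.symm hj)]
    have hR1 : pvInvR parties T1 v1 := by
      intro j hjlen hjv p hp
      by_cases hjk : j = k
      · subst hjk
        exact (hmemT1 p).2 (Or.inr hp)
      · rw [hv1ne j hjk] at hjv
        exact (hmemT1 p).2 (Or.inl (hR j hjlen hjv p hp))
    have hu1 : pvUC parties.length v1 ≤ f := by
      have := pvUC_set_true parties.length st.2 k hk hkv hv
      rw [← hv1] at this
      omega
    have hlen1 : parties.length ≤ v1.length := by rw [hv1]; simpa using hlen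
    -- main inner-loop invariant
    have fold_main : ∀ (L : List (Int × List Int)),
        (∀ ip ∈ L, ∃ kk : Nat, kk < parties.length ∧ ip.1 = (kk : Int) ∧
          ip.2 = parties.getD kk []) →
        ∀ st2 : PySem.Set Int × List Bool,
        parties.length ≤ st2.2.length → pvUC parties.length st2.2 ≤ f →
        pvInvR parties st2.1 st2.2 →
        (∀ kk : Nat, kk < parties.length → (∀ pp ∈ L, pp.1 ≠ (kk : Int)) →
          st2.2.getD kk false = false → ∀ p ∈ parties.getD kk [], p ∉ st2.1) →
        pvInvR parties (L.foldl
            (fun st2 ip =>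
              if !(PySem.List.pyGetD st2.2 ip.1 false) && pvAny st2.1 ip.2 then
                pvDfs parties f ip.1 st2
              else st2) st2).1
          (L.foldl (fun st2 ip =>
              if !(PySem.List.pyGetD st2.2 ip.1 false) && pvAny st2.1 ip.2 then
                pvDfs parties f ip.1 st2
              else st2) st2).2 ∧
        pvInvS parties (L.foldl
            (fun st2 ip =>
              if !(PySem.List.pyGetD st2.2 ip.1 false) && pvAny st2.1 ip.2 then
                pvDfs parties f ip.1 st2
              else st2) st2).1
          (L.foldl (fun st2 ip =>
              if !(PySem.List.pyGetD st2.2 ip.1 false) && pvAny st2.1 ip.2 then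
                pvDfs parties f ip.1 st2
              else st2) st2).2 ∧
        pvSub st2.1 (L.foldl (fun st2 ip =>
              if !(PySem.List.pyGetD st2.2 ip.1 false) && pvAny st2.1 ip.2 then
                pvDfs parties f ip.1 st2
              else st2) st2).1 ∧
        (∀ j : Nat, st2.2.getD j false = true → (L.foldl (fun st2 ip =>
              if !(PySem.List.pyGetD st2.2 ip.1 false) && pvAny st2.1 ip.2 then
                pvDfs parties f ip.1 st2
              else st2) st2).2.getD j false = true) ∧
        (L.foldl (fun st2 ip =>
              if !(PySem.List.pyGetD st2.2 ip.1 false) && pvAny st2.1 ip.2 then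
                pvDfs parties f ip.1 st2
              else st2) st2).2.length = st2.2.length := by
      intro L
      induction L with
      | nil =>
        intro _ st2 hlen2 hu2 hR2 hJ
        refine ⟨hR2, ?_, fun x hx => hx, fun j hj => hj, rfl⟩
        intro kk hkk hvkk p hp
        exact hJ kk hkk (by simp) hvkk p hp
      | cons ip L ihL =>
        intro hgen st2 hlen2 hu2 hR2 hJ
        rcases hgen ip (List.mem_cons_self ..) with ⟨kk, hkklen, hip1, hip2⟩
        have hgen' := fun pp hpp => hgen pp (List.mem_cons_of_mem _ hpp)
        simp only [List.foldl_cons]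
        by_cases hg : (!(PySem.List.pyGetD st2.2 ip.1 false) && pvAny st2.1 ip.2) = true
        · -- a real dfs call on party kk
          rw [if_pos hg]
          rcases Bool.and_eq_true_iff.1 hg with ⟨hnv, hany⟩
          have hvkk : st2.2.getD kk false = false := by
            rw [hip1, PySem.List.pyGetD_natCast] at hnv
            simpa using hnv
          have hcall := ih kk st2 hlen2 hkklen hvkk hu2 hR2
          rw [← hip1] at hcall
          rcases hcall with ⟨hR3, hS3, hsub3, hvm3, hlen3⟩
          have hres := ihL hgen' (pvDfs parties f ip.1 st2)
            (by rw [hlen3]; exact hlen2)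
            (le_trans (pvUC_mono parties.length st2.2 _ hvm3) hu2)
            hR3
            (fun kk' hkk' _ hvkk' p hp => hS3 kk' hkk' hvkk' p hp)
          rcases hres with ⟨hR4, hS4, hsub4, hvm4, hlen4⟩
          exact ⟨hR4, hS4, fun x hx => hsub4 x (hsub3 x hx),
            fun j hj => hvm4 j (hvm3 j hj), by rw [hlen4, hlen3]⟩
        · -- guard false: state unchanged
          rw [if_neg hg]
          refine ihL hgen' st2 hlen2 hu2 hR2 ?_
          intro kk' hkk' hnotin hvkk' p hp
          by_cases hkk'' : (ip.1 = (kk' : Int))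
          · -- this is exactly party kk', skipped: visited or disjoint
            have hkkeq : kk' = kk := by
              rw [hip1] at hkk''; exact_mod_cast hkk''.symm
            subst hkkeq
            have hg' : st2.2.getD kk' false = true ∨ pvAny st2.1 ip.2 = false := by
              rcases Bool.and_eq_false_iff.1 (Bool.not_eq_true _ ▸ hg : _) with h | h
              · left
                rw [hip1, PySem.List.pyGetD_natCast] at h
                simpa using h
              · right; exact h
            rcases hg' with h | h
            · rw [h] at hvkk'; cases hvkk'
            · rw [hip2] at h
              intro hpT
              have : pvAny st2.1 (parties.getD kk' []) = true :=
                (pvAny_iff ..).2 ⟨p, hp, hpT⟩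
              rw [this] at h; cases h
          · exact hJ kk' hkk' (fun pp hpp => by
              rcases List.mem_cons.1 hpp with rfl | hpp
              · exact hkk''
              · exact hnotin pp hpp) hvkk' p hp
    have := fold_main (PySem.List.enumerate parties 0)
      (fun ip hip => by
        rcases (PySem.List.mem_enumerate_iff ..).1 hip with ⟨kk, hkk, rfl⟩
        exact ⟨kk, hkk, by simp, by simp [List.getD_eq_getElem?_getD, List.getElem?_eq_getElem hkk]⟩)
      (T1, v1) hlen1 hu1 hR1
      (fun kk hkk hnotin _ _ _ => by
        exfalso
        have hmem : ((0 + (kk : Int)), parties[kk]) ∈ PySem.List.enumerate parties 0 :=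
          (PySem.List.mem_enumerate_iff ..).2 ⟨kk, hkk, rfl⟩
        have := hnotin _ hmem
        simp at this)
    rcases this with ⟨hR4, hS4, hsub4, hvm4, hlen4⟩
    refine ⟨hR4, hS4, fun x hx => hsub4 x ((hmemT1 x).2 (Or.inl hx)), ?_, ?_⟩
    · intro j hj
      exact hvm4 j (pv_getD_set_true_mono st.2 k j hj)
    · rw [hlen4, hv1]; simp

-- soundness: dfs never leaves a closed superset of the current truth set
lemma pvDfs_sound (parties : List (List Int)) (C : List Int) (hC : pvClosed parties C) :
    ∀ (fuel : Nat) (k : Nat) (st : PySem.Set Int × List Bool),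
    k < parties.length → pvAny st.1 (parties.getD k []) = true → pvSub st.1 C →
    pvSub (pvDfs parties fuel (k : Int) st).1 C := by
  intro fuel
  induction fuel with
  | zero => intro k st _ _ hsub; exact hsub
  | succ f ih =>
    intro k st hk hany hsub
    by_cases hvk : PySem.List.pyGetD st.2 (k : Int) false = true
    · rw [pvDfs_visited parties (f + 1) (k : Int) st hvk]
      exact hsub
    · have hv : st.2.getD k false = false := by
        rw [PySem.List.pyGetD_natCast] at hvk
        simpa using hvk
      have hunf : pvDfs parties (f + 1) (k : Int) st =
          (PySem.List.enumerate parties 0).foldl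
            (fun st2 ip =>
              if !(PySem.List.pyGetD st2.2 ip.1 false) && pvAny st2.1 ip.2 then
                pvDfs parties f ip.1 st2
              else st2)
            ((parties.getD k []).foldl PySem.Set.add st.1, st.2.set k true) := by
        have h1 : pvDfs parties (f + 1) (k : Int) st =
            if PySem.List.pyGetD st.2 (k : Int) false then st
            else (PySem.List.enumerate parties 0).foldl
              (fun st2 ip =>
                if !(PySem.List.pyGetD st2.2 ip.1 false) && pvAny st2.1 ip.2 then
                  pvDfs parties f ip.1 st2
                else st2)
              ((PySem.List.pyGetD parties (k : Int) []).foldl PySem.Set.add st.1,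
               PySem.List.pySetD st.2 (k : Int) true) := rfl
        rw [h1, PySem.List.pyGetD_natCast, hv, PySem.List.pyGetD_natCast,
          PySem.List.pySetD_natCast]
        simp
      rw [hunf]
      -- the absorbed truth set stays inside C
      have hpkC : ∀ p ∈ parties.getD k [], p ∈ C := by
        rcases (pvAny_iff ..).1 hany with ⟨q, hq, hqT⟩
        have hpk : parties.getD k [] ∈ parties := by
          rw [List.getD_eq_getElem?_getD, List.getElem?_eq_getElem hk]
          exact List.getElem_mem hk
        exact hC _ hpk ⟨q, hq, hsub q hqT⟩
      have hsub1 : pvSub ((parties.getD k []).foldl PySem.Set.add st.1) C := by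
        intro x hx
        have : x ∈ st.1 ∨ x ∈ parties.getD k [] := by
          simpa [PySem.Set.update] using
            (PySem.Set.mem_update (s := st.1) (xs := parties.getD k []) (y := x)).1 hx
        rcases this with h | h
        · exact hsub x h
        · exact hpkC x h
      -- the inner loop preserves inclusion in C
      have fold_sound : ∀ (L : List (Int × List Int)),
          (∀ ip ∈ L, ∃ kk : Nat, kk < parties.length ∧ ip.1 = (kk : Int) ∧
            ip.2 = parties.getD kk []) →
          ∀ st2 : PySem.Set Int × List Bool, pvSub st2.1 C →
          pvSub ((L.foldl (fun st2 ip =>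
              if !(PySem.List.pyGetD st2.2 ip.1 false) && pvAny st2.1 ip.2 then
                pvDfs parties f ip.1 st2
              else st2) st2)).1 C := by
        intro L
        induction L with
        | nil => intro _ st2 h; exact h
        | cons ip L ihL =>
          intro hgen st2 hsub2
          rcases hgen ip (List.mem_cons_self ..) with ⟨kk, hkklen, hip1, hip2⟩
          simp only [List.foldl_cons]
          refine ihL (fun pp hpp => hgen pp (List.mem_cons_of_mem _ hpp)) _ ?_
          by_cases hg : (!(PySem.List.pyGetD st2.2 ip.1 false) && pvAny st2.1 ip.2) = true
          · rw [if_pos hg]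
            rcases Bool.and_eq_true_iff.1 hg with ⟨_, hany2⟩
            rw [hip1]
            refine ih kk st2 hkklen ?_ hsub2
            rw [hip2] at hany2
            exact hany2
          · rw [if_neg hg]
            exact hsub2
      refine fold_sound (PySem.List.enumerate parties 0) (fun ip hip => ?_) _ hsub1
      rcases (PySem.List.mem_enumerate_iff ..).1 hip with ⟨kk, hkk, rfl⟩
      exact ⟨kk, hkk, by simp, by simp [List.getD_eq_getElem?_getD, List.getElem?_eq_getElem hkk]⟩

-- A's top-level loop, case len ≤ |visited|: the final truth set contains the seed,
-- is closed, and R/S hold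
lemma pvA_loop (parties : List (List Int)) (T0 : PySem.Set Int) (v0 : List Bool)
    (hlen : parties.length ≤ v0.length) (hv0 : ∀ k : Nat, v0.getD k false = false) :
    pvSub T0 ((PySem.List.enumerate parties 0).foldl
      (fun st ip => if pvAny st.1 ip.2 then pvDfs parties (parties.length + 1) ip.1 st else st)
      (T0, v0)).1 ∧
    pvClosed parties ((PySem.List.enumerate parties 0).foldl
      (fun st ip => if pvAny st.1 ip.2 then pvDfs parties (parties.length + 1) ip.1 st else st)
      (T0, v0)).1 := by
  have fold_top : ∀ (L : List (Int × List Int)),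
      (∀ ip ∈ L, ∃ kk : Nat, kk < parties.length ∧ ip.1 = (kk : Int) ∧
        ip.2 = parties.getD kk []) →
      ∀ st2 : PySem.Set Int × List Bool,
      parties.length ≤ st2.2.length →
      pvInvR parties st2.1 st2.2 →
      (∀ kk : Nat, kk < parties.length → (∀ pp ∈ L, pp.1 ≠ (kk : Int)) →
        st2.2.getD kk false = false → ∀ p ∈ parties.getD kk [], p ∉ st2.1) →
      pvInvR parties (L.foldl
          (fun st ip => if pvAny st.1 ip.2 then pvDfs parties (parties.length + 1) ip.1 st else st)
          st2).1
        (L.foldl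
          (fun st ip => if pvAny st.1 ip.2 then pvDfs parties (parties.length + 1) ip.1 st else st)
          st2).2 ∧
      pvInvS parties (L.foldl
          (fun st ip => if pvAny st.1 ip.2 then pvDfs parties (parties.length + 1) ip.1 st else st)
          st2).1
        (L.foldl
          (fun st ip => if pvAny st.1 ip.2 then pvDfs parties (parties.length + 1) ip.1 st else st)
          st2).2 ∧
      pvSub st2.1 (L.foldl
          (fun st ip => if pvAny st.1 ip.2 then pvDfs parties (parties.length + 1) ip.1 st else st)
          st2).1 := by
    intro L
    induction L with
    | nil =>
      intro _ st2 _ hR2 hJ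
      refine ⟨hR2, ?_, fun x hx => hx⟩
      intro kk hkk hvkk p hp
      exact hJ kk hkk (by simp) hvkk p hp
    | cons ip L ihL =>
      intro hgen st2 hlen2 hR2 hJ
      rcases hgen ip (List.mem_cons_self ..) with ⟨kk, hkklen, hip1, hip2⟩
      have hgen' := fun pp hpp => hgen pp (List.mem_cons_of_mem _ hpp)
      simp only [List.foldl_cons]
      by_cases hg : pvAny st2.1 ip.2 = true
      · rw [if_pos hg]
        by_cases hvt : st2.2.getD kk false = true
        · -- party kk already visited: dfs returns immediately
          have : pvDfs parties (parties.length + 1) ip.1 st2 = st2 := by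
            refine pvDfs_visited parties _ ip.1 st2 ?_
            rw [hip1, PySem.List.pyGetD_natCast]
            exact hvt
          rw [this]
          refine ihL hgen' st2 hlen2 hR2 ?_
          intro kk' hkk' hnotin hvkk' p hp
          by_cases hkk'' : (ip.1 = (kk' : Int))
          · have hkkeq : kk' = kk := by
              rw [hip1] at hkk''; exact_mod_cast hkk''.symm
            subst hkkeq
            rw [hvt] at hvkk'; cases hvkk'
          · exact hJ kk' hkk' (fun pp hpp => by
              rcases List.mem_cons.1 hpp with rfl | hpp
              · exact hkk''
              · exact hnotin pp hpp) hvkk' p hp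
        · -- a real dfs call
          simp only [Bool.not_eq_true] at hvt
          have hcall := pvDfs_main parties (parties.length + 1) kk st2 hlen2 hkklen hvt
            (le_trans (pvUC_le parties.length st2.2) (Nat.le_succ _)) hR2
          rw [← hip1] at hcall
          rcases hcall with ⟨hR3, hS3, hsub3, _, hlen3⟩
          have hres := ihL hgen' (pvDfs parties (parties.length + 1) ip.1 st2)
            (by rw [hlen3]; exact hlen2) hR3
            (fun kk' hkk' _ hvkk' p hp => hS3 kk' hkk' hvkk' p hp)
          rcases hres with ⟨hR4, hS4, hsub4⟩
          exact ⟨hR4, hS4, fun x hx => hsub4 x (hsub3 x hx)⟩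
      · rw [if_neg hg]
        refine ihL hgen' st2 hlen2 hR2 ?_
        intro kk' hkk' hnotin hvkk' p hp
        by_cases hkk'' : (ip.1 = (kk' : Int))
        · have hkkeq : kk' = kk := by
            rw [hip1] at hkk''; exact_mod_cast hkk''.symm
          subst hkkeq
          intro hpT
          have : pvAny st2.1 ip.2 = true := by
            rw [hip2]
            exact (pvAny_iff ..).2 ⟨p, hp, hpT⟩
          exact hg this
        · exact hJ kk' hkk' (fun pp hpp => by
            rcases List.mem_cons.1 hpp with rfl | hpp
            · exact hkk''
            · exact hnotin pp hpp) hvkk' p hp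
  have hres := fold_top (PySem.List.enumerate parties 0)
    (fun ip hip => by
      rcases (PySem.List.mem_enumerate_iff ..).1 hip with ⟨kk, hkk, rfl⟩
      exact ⟨kk, hkk, by simp, by simp [List.getD_eq_getElem?_getD, List.getElem?_eq_getElem hkk]⟩)
    (T0, v0) hlen
    (fun j _ hj => by rw [hv0 j] at hj; cases hj)
    (fun kk hkk hnotin _ _ _ => by
      exfalso
      have hmem : ((0 + (kk : Int)), parties[kk]) ∈ PySem.List.enumerate parties 0 :=
        (PySem.List.mem_enumerate_iff ..).2 ⟨kk, hkk, rfl⟩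
      have := hnotin _ hmem
      simp at this)
  rcases hres with ⟨hR, hS, hsub⟩
  refine ⟨hsub, ?_⟩
  intro party hparty hint p hp
  rcases List.getElem_of_mem hparty with ⟨kk, hkk, rfl⟩
  have hgd : parties.getD kk [] = parties[kk] := by
    rw [List.getD_eq_getElem?_getD, List.getElem?_eq_getElem hkk]
    rfl
  by_cases hvkk : (((PySem.List.enumerate parties 0).foldl
      (fun st ip => if pvAny st.1 ip.2 then pvDfs parties (parties.length + 1) ip.1 st else st)
      (T0, v0)).2.getD kk false) = true
  · have := hR kk hkk hvkk p (by rw [hgd]; exact hp)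
    exact this
  · exfalso
    simp only [Bool.not_eq_true] at hvkk
    rcases hint with ⟨q, hq, hqT⟩
    exact hS kk hkk hvkk q (by rw [hgd]; exact hq) hqT

-- A's top-level loop stays inside any closed superset of the seed
lemma pvA_loop_sound (parties : List (List Int)) (C : List Int) (hC : pvClosed parties C)
    (T0 : PySem.Set Int) (v0 : List Bool) (h0 : pvSub T0 C) :
    pvSub ((PySem.List.enumerate parties 0).foldl
      (fun st ip => if pvAny st.1 ip.2 then pvDfs parties (parties.length + 1) ip.1 st else st)
      (T0, v0)).1 C := by
  have fold_sound : ∀ (L : List (Int × List Int)),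
      (∀ ip ∈ L, ∃ kk : Nat, kk < parties.length ∧ ip.1 = (kk : Int) ∧
        ip.2 = parties.getD kk []) →
      ∀ st2 : PySem.Set Int × List Bool, pvSub st2.1 C →
      pvSub ((L.foldl
        (fun st ip => if pvAny st.1 ip.2 then pvDfs parties (parties.length + 1) ip.1 st else st)
        st2)).1 C := by
    intro L
    induction L with
    | nil => intro _ st2 h; exact h
    | cons ip L ihL =>
      intro hgen st2 hsub2
      rcases hgen ip (List.mem_cons_self ..) with ⟨kk, hkklen, hip1, hip2⟩
      simp only [List.foldl_cons]
      refine ihL (fun pp hpp => hgen pp (List.mem_cons_of_mem _ hpp)) _ ?_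
      by_cases hg : pvAny st2.1 ip.2 = true
      · rw [if_pos hg, hip1]
        refine pvDfs_sound parties C hC _ kk st2 hkklen ?_ hsub2
        rw [hip2] at hg
        exact hg
      · rw [if_neg hg]
        exact hsub2
  refine fold_sound (PySem.List.enumerate parties 0) (fun ip hip => ?_) _ h0
  rcases (PySem.List.mem_enumerate_iff ..).1 hip with ⟨kk, hkk, rfl⟩
  exact ⟨kk, hkk, by simp, by simp [List.getD_eq_getElem?_getD, List.getElem?_eq_getElem hkk]⟩

-- if no party touches the seed, A's loop does nothing
lemma pvA_loop_frozen (parties : List (List Int)) (T0 : PySem.Set Int) (v0 : List Bool)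
    (h : ∀ party ∈ parties, pvAny T0 party = false) :
    (PySem.List.enumerate parties 0).foldl
      (fun st ip => if pvAny st.1 ip.2 then pvDfs parties (parties.length + 1) ip.1 st else st)
      (T0, v0) = (T0, v0) := by
  have fold_frozen : ∀ (L : List (Int × List Int)),
      (∀ ip ∈ L, pvAny T0 ip.2 = false) →
      L.foldl
        (fun st ip => if pvAny st.1 ip.2 then pvDfs parties (parties.length + 1) ip.1 st else st)
        (T0, v0) = (T0, v0) := by
    intro L
    induction L with
    | nil => intro _; rfl
    | cons ip L ihL =>
      intro hL
      simp only [List.foldl_cons, hL ip (List.mem_cons_self ..), Bool.false_eq_true, if_false]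
      exact ihL (fun pp hpp => hL pp (List.mem_cons_of_mem _ hpp))
  refine fold_frozen _ (fun ip hip => ?_)
  rcases (PySem.List.mem_enumerate_iff ..).1 hip with ⟨kk, hkk, rfl⟩
  exact h parties[kk] (List.getElem_mem hkk)

-- ===== B-side =====

lemma pvPass_flag (parties : List (List Int)) (L : List (List Int))
    (st : PySem.Set Int × Bool) (h : st.2 = true) : (L.foldl pvPassStep st).2 = true := by
  induction L generalizing st with
  | nil => exact h
  | cons a L ih =>
    simp only [List.foldl_cons]
    refine ih _ ?_
    by_cases hc : (pvAny st.1 a && !(pvAll st.1 a)) = true <;> simp [pvPassStep, hc, h]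

lemma pvPass_mono (L : List (List Int)) (st : PySem.Set Int × Bool) :
    pvSub st.1 (L.foldl pvPassStep st).1 := by
  induction L generalizing st with
  | nil => exact fun x hx => hx
  | cons a L ih =>
    simp only [List.foldl_cons]
    intro x hx
    refine ih (pvPassStep st a) x ?_
    by_cases hc : (pvAny st.1 a && !(pvAll st.1 a)) = true
    · simp [pvPassStep, hc, PySem.Set.mem_update]
      exact Or.inl hx
    · simpa [pvPassStep, hc] using hx

lemma pvPass_unchanged (parties : List (List Int)) :
    ∀ (L : List (List Int)) (T : PySem.Set Int),
    ((L.foldl pvPassStep (T, false)).2 = false) →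
    (L.foldl pvPassStep (T, false)).1 = T ∧
      ∀ party ∈ L, (∃ p ∈ party, p ∈ T) → ∀ p ∈ party, p ∈ T := by
  intro L T h
  induction L with
  | nil => exact ⟨rfl, by simp⟩
  | cons a L ih =>
    by_cases hc : (pvAny T a && !(pvAll T a)) = true
    · exfalso
      have := pvPass_flag parties L ((PySem.Set.update T a, true)) rfl
      simp only [List.foldl_cons, pvPassStep, hc, if_true] at h
      rw [h] at this
      cases this
    · simp only [List.foldl_cons, pvPassStep, hc, if_false] at h ⊢
      rcases ih h with ⟨h1, h2⟩
      refine ⟨h1, fun party hp hint => ?_⟩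
      rcases List.mem_cons.1 hp with rfl | hp
      · have hany : pvAny T party = true := (pvAny_iff T party).2 hint
        have hall : pvAll T party = true := by
          by_contra hall
          simp only [Bool.not_eq_true] at hall
          simp [hany, hall] at hc
        exact (pvAll_iff T party).1 hall
      · exact h2 party hp hint

lemma pvPass_progress : ∀ (L : List (List Int)) (st : PySem.Set Int × Bool),
    st.2 = false → (L.foldl pvPassStep st).2 = true →
    ∃ x : Int, x ∈ L.flatten ∧ x ∉ st.1 ∧ x ∈ (L.foldl pvPassStep st).1 := by
  intro L
  induction L with
  | nil =>
    intro st h0 h1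
    rw [List.foldl_nil, h0] at h1
    cases h1
  | cons a L ih =>
    intro st h0 h1
    by_cases hc : (pvAny st.1 a && !(pvAll st.1 a)) = true
    · have hall : pvAll st.1 a = false := by
        have : pvAny st.1 a = true ∧ ¬ pvAll st.1 a = true := by simpa using hc
        simpa using this.2
      have : ∃ x ∈ a, x ∉ st.1 := by
        simpa [pvAll] using hall
      rcases this with ⟨x, hxa, hxT⟩
      refine ⟨x, by simp [List.mem_flatten]; exact Or.inl hxa, hxT, ?_⟩
      have hmono := pvPass_mono L (PySem.Set.update st.1 a, true)
      simp only [List.foldl_cons, pvPassStep, hc, if_true]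
      exact hmono x (by simp [PySem.Set.mem_update, hxa])
    · simp only [List.foldl_cons, pvPassStep, hc, if_false]
      have h1' : (L.foldl pvPassStep st).2 = true := by
        simpa only [List.foldl_cons, pvPassStep, hc, if_false] using h1
      rcases ih st h0 h1' with ⟨x, hx1, hx2, hx3⟩
      exact ⟨x, by simp [List.mem_flatten] at hx1 ⊢; exact Or.inr hx1, hx2, hx3⟩

lemma pvPass_sound (C : List Int) : ∀ (L : List (List Int)) (st : PySem.Set Int × Bool),
    (∀ party ∈ L, (∃ p ∈ party, p ∈ C) → ∀ p ∈ party, p ∈ C) → pvSub st.1 C →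
    pvSub (L.foldl pvPassStep st).1 C := by
  intro L
  induction L with
  | nil => intro st _ hsub; exact hsub
  | cons a L ih =>
    intro st hC hsub
    simp only [List.foldl_cons]
    refine ih _ (fun party hp => hC party (List.mem_cons_of_mem _ hp)) ?_
    by_cases hc : (pvAny st.1 a && !(pvAll st.1 a)) = true
    · simp only [pvPassStep, hc, if_true]
      intro x hx
      rcases (PySem.Set.mem_update ..).1 hx with hx | hx
      · exact hsub x hx
      · have hany : pvAny st.1 a = true := by
          have : pvAny st.1 a = true ∧ ¬ pvAll st.1 a = true := by simpa using hc
          exact this.1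
        rcases (pvAny_iff ..).1 hany with ⟨p, hp, hpT⟩
        exact hC a (List.mem_cons_self ..) ⟨p, hp, hsub p hpT⟩ x hx
    · simpa [pvPassStep, hc] using hsub

lemma pvSaturate_main (parties : List (List Int)) : ∀ (fuel : Nat) (T : PySem.Set Int),
    parties.flatten.countP (fun x => !(T.contains x)) < fuel →
    pvSub T (pvSaturate parties fuel T) ∧ pvClosed parties (pvSaturate parties fuel T) := by
  intro fuel
  induction fuel with
  | zero => intro T h; omega
  | succ f ih =>
    intro T h
    by_cases h2 : (pvPass parties T).2 = true
    · rcases pvPass_progress parties (T, false) rfl h2 with ⟨x, hxf, hxT, hxT'⟩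
      have hmono : pvSub T (pvPass parties T).1 := pvPass_mono parties (T, false)
      have hxP : x ∈ (pvPass parties T).1 := hxT'
      have hdec : parties.flatten.countP (fun y => !((pvPass parties T).1.contains y)) <
          parties.flatten.countP (fun y => !(T.contains y)) := by
        refine pv_countP_lt _ _ _ (fun a ha => ?_) x hxf (by simpa using hxT) (by simpa using hxP)
        simp only [Bool.not_eq_true'] at ha ⊢
        by_contra hTa
        simp only [Bool.not_eq_false] at hTa
        have haT : a ∈ T := by simpa using hTa
        have hmem := hmono a haT
        have hct : (pvPass parties T).1.contains a = true := by simpa using hmem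
        cases hct.symm.trans ha
      have hrec := ih (pvPass parties T).1 (by omega)
      simp only [pvSaturate, h2, if_true]
      exact ⟨fun y hy => hrec.1 y (hmono y hy), hrec.2⟩
    · simp only [Bool.not_eq_true] at h2
      have h2' : (parties.foldl pvPassStep (T, false)).2 = false := h2
      rcases pvPass_unchanged parties parties T h2' with ⟨h1, hcl⟩
      simp only [pvSaturate, h2, Bool.false_eq_true, if_false]
      have h1' : (pvPass parties T).1 = T := h1
      rw [h1']
      exact ⟨fun y hy => hy, hcl⟩

lemma pvSaturate_sound (parties : List (List Int)) (C : List Int) (hC : pvClosed parties C) :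
    ∀ (fuel : Nat) (T : PySem.Set Int), pvSub T C → pvSub (pvSaturate parties fuel T) C := by
  intro fuel
  induction fuel with
  | zero => intro T h; exact h
  | succ f ih =>
    intro T h
    have hpass : pvSub (pvPass parties T).1 C := pvPass_sound C parties (T, false) hC h
    by_cases h2 : (pvPass parties T).2 = true
    · simp only [pvSaturate, h2, if_true]
      exact ih _ hpass
    · simp only [Bool.not_eq_true] at h2
      simp only [pvSaturate, h2, Bool.false_eq_true, if_false]
      exact hpass

-- ===== assembly =====

lemma pv_counts_eq (parties : List (List Int)) (TA TB : PySem.Set Int)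
    (h : ∀ x : Int, x ∈ TA ↔ x ∈ TB) :
    (PySem.List.enumerate parties 0).foldl
      (fun acc ip => if !(pvAny TA ip.2) then acc + 1 else acc) (0 : Int) =
    parties.foldl (fun acc party => if !(pvAny TB party) then acc + 1 else acc) (0 : Int) := by
  rw [PySem.List.foldl_if_add_one, PySem.List.foldl_if_add_one]
  have hcnt : (PySem.List.enumerate parties 0).countP (fun ip => !(pvAny TA ip.2)) =
      parties.countP (fun party => !(pvAny TB party)) := by
    conv_rhs => rw [← PySem.List.map_snd_enumerate parties 0]
    rw [List.countP_map]
    refine List.countP_congr (fun ip _ => ?_)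
    simp only [Function.comp]
    rw [pvAny_congr TA TB h]
  rw [hcnt]

-- ===== VERDICT (by name: the statement is the Claim_ definition above) =====
theorem count_valid_parties_spec : Claim_equal_count_valid_parties := by
  intro N M kt pp hdom hpre
  show count_valid_parties N M kt pp = count_valid_parties_alt N M kt pp
  have hB := pvSaturate_main pp (pp.flatten.length + 1) (PySem.Set.ofList kt)
    (by
      have := List.countP_le_length
        (l := pp.flatten) (p := fun x => !((PySem.Set.ofList kt).contains x))
      omega)
  have hAB : ∀ x : Int,
      x ∈ ((PySem.List.enumerate pp 0).foldl
        (fun st ip => if pvAny st.1 ip.2 then pvDfs pp (pp.length + 1) ip.1 st else st)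
        (PySem.Set.ofList kt, List.replicate M.toNat false)).1 ↔
      x ∈ pvSaturate pp (pp.flatten.length + 1) (PySem.Set.ofList kt) := by
    rcases hpre with hM | hdisj
    · -- enough visited slots: both sets are the closure of the seed
      have hlenv : pp.length ≤ (List.replicate M.toNat false).length := by
        simp only [List.length_replicate]
        omega
      have hv0 : ∀ k : Nat, (List.replicate M.toNat false).getD k false = false := by
        intro k
        simp only [List.getD_eq_getElem?_getD, List.getElem?_replicate]
        split <;> simp
      have hA := pvA_loop pp (PySem.Set.ofList kt) (List.replicate M.toNat false) hlenv hv0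
      intro x
      constructor
      · exact fun hx =>
          pvA_loop_sound pp _ hB.2 (PySem.Set.ofList kt) (List.replicate M.toNat false) hB.1 x hx
      · exact fun hx => pvSaturate_sound pp _ hA.2 _ (PySem.Set.ofList kt) hA.1 x hx
    · -- no party touches the seed: both sets stay at the seed
      have hfrozen : ∀ party ∈ pp, pvAny (PySem.Set.ofList kt) party = false := by
        intro party hp
        rw [Bool.eq_false_iff]
        intro hne
        rcases (pvAny_iff ..).1 hne with ⟨p, hp2, hmem⟩
        exact hdisj party hp p hp2 (by simpa [PySem.Set.mem_ofList] using hmem)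
      have hTA := congrArg Prod.fst
        (pvA_loop_frozen pp (PySem.Set.ofList kt) (List.replicate M.toNat false) hfrozen)
      have hclosed0 : pvClosed pp (PySem.Set.ofList kt) := by
        intro party hp hint p _
        exfalso
        have := (pvAny_iff ..).2 hint
        rw [hfrozen party hp] at this
        cases this
      have hBsub : pvSub (pvSaturate pp (pp.flatten.length + 1) (PySem.Set.ofList kt))
          (PySem.Set.ofList kt) :=
        pvSaturate_sound pp _ hclosed0 _ (PySem.Set.ofList kt) (fun x hx => hx)
      intro x
      rw [hTA]
      exact ⟨fun hx => hB.1 x hx, fun hx => hBsub x hx⟩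
  exact pv_counts_eq pp _ _ hAB
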